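-- pv_equiv track=rewrite | github.com/aolman/researchDeliverable | helpers.py | createHeatmapArray
-- ===== SOURCE A (Python) =====
-- def createHeatmapArray(calibrated_intensity, rows, cols, num_droplets):
--     calibrated_intensity[:] = calibrated_intensity[::-1]
--     intensity_per_well = []
--     row = []
--     for i, intensity in enumerate(calibrated_intensity):
--
--         if (i % num_droplets == 1):
--             row.append(intensity)
--
--         if (i % (cols * num_droplets) == cols * num_droplets - 1):
--             intensity_per_well.append(row)
--             row = []
--     intensity_per_well = list(map(list, zip(*intensity_per_well)))
--
--     return intensity_per_well
-- ===== SOURCE B (Python) =====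
-- def createHeatmapArray(calibrated_intensity, rows, cols, num_droplets):
--     # closed-form gather: result[c][b] = reversed[b*W + c*num_droplets + 1]
--     calibrated_intensity[:] = calibrated_intensity[::-1]
--     if num_droplets < 2 or cols < 1:
--         return []
--     W = cols * num_droplets
--     num_blocks = len(calibrated_intensity) // W
--     if num_blocks == 0:
--         return []
--     return [[calibrated_intensity[b * W + c * num_droplets + 1]
--              for b in range(num_blocks)]
--             for c in range(cols)]
-- ===== Notes on version B (the rewrite author's own statement) =====
-- stated objective: faster
-- what changed: Replaces A's stateful single pass with modular bucketing, row accumulator and a final zip-transpose by a direct closed-form gather: compute the number of complete blocks and build the transposed grid immediately as result[c][b] = reversed[b*cols*num_droplets + c*num_droplets + 1], touching only the selected elements instead of iterating over the whole array.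
import Mathlib
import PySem

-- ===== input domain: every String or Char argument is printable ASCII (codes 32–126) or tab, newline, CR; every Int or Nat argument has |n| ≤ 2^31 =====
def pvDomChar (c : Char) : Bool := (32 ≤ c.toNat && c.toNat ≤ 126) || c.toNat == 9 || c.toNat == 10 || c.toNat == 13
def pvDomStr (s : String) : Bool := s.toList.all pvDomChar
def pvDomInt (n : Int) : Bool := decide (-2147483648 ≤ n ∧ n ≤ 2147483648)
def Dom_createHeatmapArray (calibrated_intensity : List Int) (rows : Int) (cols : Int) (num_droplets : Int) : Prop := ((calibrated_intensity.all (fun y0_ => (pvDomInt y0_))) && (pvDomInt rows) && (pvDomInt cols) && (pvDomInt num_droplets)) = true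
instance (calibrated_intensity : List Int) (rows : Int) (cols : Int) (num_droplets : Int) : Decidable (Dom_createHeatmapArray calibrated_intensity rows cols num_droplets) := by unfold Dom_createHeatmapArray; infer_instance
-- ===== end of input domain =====

-- B replaces A's stateful modular-bucketing pass + zip-transpose by a direct closed-form gather
-- that touches only the selected elements (objective: faster; measured faster in a timing run).
-- Both versions reverse the input list in place (same mutation); the theorems are about the RETURN value.

-- ===== PORT A =====
-- loop body of A's 'for i, intensity in enumerate(...)'
def stepA (cols : Int) (num_droplets : Int) (st : List (List Int) × List Int) (p : Int × Int) : List (List Int) × List Int :=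
  let row' := if PySem.Int.mod p.1 num_droplets = 1 then st.2 ++ [p.2] else st.2
  if PySem.Int.mod p.1 (cols * num_droplets) = cols * num_droplets - 1 then (st.1 ++ [row'], [])
  else (st.1, row')

-- list(map(list, zip(*rowsL))): truncating transpose
def pyZipStarL (rowsL : List (List Int)) : List (List Int) :=
  match rowsL with
  | [] => []
  | r0 :: rs =>
    let m := rs.foldl (fun acc l => min acc l.length) r0.length
    (List.range m).map (fun j => (r0 :: rs).map (fun l => l.getD j 0))

def createHeatmapArray (calibrated_intensity : List Int) (rows : Int) (cols : Int) (num_droplets : Int) : List (List Int) :=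
  -- calibrated_intensity[:] = calibrated_intensity[::-1]  (slice? xs none none (-1) = reverse)
  let r := calibrated_intensity.reverse
  let st := (PySem.List.enumerate r 0).foldl (stepA cols num_droplets) ([], [])
  pyZipStarL st.1

-- ===== PORT B =====
def createHeatmapArray_alt (calibrated_intensity : List Int) (rows : Int) (cols : Int) (num_droplets : Int) : List (List Int) :=
  let r := calibrated_intensity.reverse
  if num_droplets < 2 ∨ cols < 1 then []
  else
    let W := cols * num_droplets
    let num_blocks := PySem.Int.floordiv (r.length : Int) W
    if num_blocks = 0 then []
    else
      (List.range cols.toNat).map (fun (c : Nat) =>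
        (List.range num_blocks.toNat).map (fun (b : Nat) =>
          -- r[b*W + c*num_droplets + 1]: the index is always in range here (b < num_blocks,
          -- c < cols), so the pyGetD default is never taken and the port is exact
          PySem.List.pyGetD r ((b : Int) * W + (c : Int) * num_droplets + 1) 0))

-- ===== PRECONDITION & SPEC =====
-- Pre_ excludes exactly the inputs where A raises ZeroDivisionError: a nonempty list with
-- num_droplets == 0 or cols == 0 (i % num_droplets or i % (cols*num_droplets) divides by 0).
def Pre_createHeatmapArray (calibrated_intensity : List Int) (rows : Int) (cols : Int) (num_droplets : Int) : Prop :=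
  calibrated_intensity = [] ∨ (num_droplets ≠ 0 ∧ cols ≠ 0)
instance (calibrated_intensity : List Int) (rows : Int) (cols : Int) (num_droplets : Int) : Decidable (Pre_createHeatmapArray calibrated_intensity rows cols num_droplets) := by unfold Pre_createHeatmapArray; infer_instance
def pvWitness_createHeatmapArray : List Int × Int × Int × Int := ([3, 1, 4, 1, 5, 9], 0, 1, 2)

def Spec_createHeatmapArray (calibrated_intensity : List Int) (rows : Int) (cols : Int) (num_droplets : Int) (out : List (List Int)) : Prop := out = createHeatmapArray_alt calibrated_intensity rows cols num_droplets
instance (calibrated_intensity : List Int) (rows : Int) (cols : Int) (num_droplets : Int) (out : List (List Int)) : Decidable (Spec_createHeatmapArray calibrated_intensity rows cols num_droplets out) := by unfold Spec_createHeatmapArray; infer_instance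

-- ===== CLAIM (what is proved, stated in full; the proofs are below) =====
def Claim_equal_createHeatmapArray : Prop := ∀ (calibrated_intensity : List Int) (rows : Int) (cols : Int) (num_droplets : Int), Dom_createHeatmapArray calibrated_intensity rows cols num_droplets → Pre_createHeatmapArray calibrated_intensity rows cols num_droplets → Spec_createHeatmapArray calibrated_intensity rows cols num_droplets (createHeatmapArray calibrated_intensity rows cols num_droplets)

-- ===== LEMMAS AND PROOFS =====

-- number of j < t with j % d = 1 (for 2 ≤ d)
def numSel (d t : Nat) : Nat := (t + d - 2) / d

lemma numSel_closed (d q s : Nat) (hd : 2 ≤ d) (hs : s < d) :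
    numSel d (q * d + s) = if s ≤ 1 then q else q + 1 := by
  unfold numSel
  have h1 : q * d + s + d - 2 = d * q + (s + d - 2) := by rw [Nat.mul_comm]; omega
  rw [h1, Nat.mul_add_div (by omega)]
  by_cases hle : s ≤ 1
  · rw [if_pos hle, Nat.div_eq_of_lt (by omega)]; omega
  · rw [if_neg hle]
    have : (s + d - 2) / d = 1 := by
      have := Nat.div_eq_of_lt_le (m := s + d - 2) (n := d) (k := 1) (by omega) (by omega)
      simpa using this
    omega

lemma sel_idx_lt (d t c : Nat) (hd : 2 ≤ d) (hc : c < numSel d t) : c * d + 1 < t := by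
  have hqs := Nat.div_add_mod t d
  have hs : t % d < d := Nat.mod_lt _ (by omega)
  have htq : t = t / d * d + t % d := by rw [Nat.mul_comm]; omega
  rw [htq, numSel_closed d (t / d) (t % d) hd hs] at hc
  by_cases hs1 : t % d ≤ 1
  · rw [if_pos hs1] at hc
    have h1 := Nat.mul_le_mul_right d hc
    rw [Nat.succ_mul] at h1
    omega
  · rw [if_neg hs1] at hc
    have h1 := Nat.mul_le_mul_right d (show c ≤ t / d by omega)
    omega

lemma numSel_succ_of_one (d t : Nat) (hd : 2 ≤ d) (h1 : t % d = 1) :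
    numSel d (t + 1) = numSel d t + 1 ∧ numSel d t * d + 1 = t := by
  have hqs := Nat.div_add_mod t d
  set q := t / d with hq
  have htq : t = q * d + 1 := by rw [Nat.mul_comm]; omega
  have hnt : numSel d t = q := by rw [htq, numSel_closed d q 1 hd (by omega)]; simp
  refine ⟨?_, by rw [hnt]; omega⟩
  by_cases hd2 : d = 2
  · have h2 : t + 1 = (q + 1) * d + 0 := by rw [Nat.succ_mul]; omega
    rw [h2, numSel_closed d (q + 1) 0 hd (by omega), hnt]; simp
  · have h2 : t + 1 = q * d + 2 := by omega
    rw [h2, numSel_closed d q 2 hd (by omega), hnt]; simp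

lemma numSel_succ_of_ne_one (d t : Nat) (hd : 2 ≤ d) (h1 : t % d ≠ 1) :
    numSel d (t + 1) = numSel d t := by
  have hqs := Nat.div_add_mod t d
  set q := t / d with hq
  set s := t % d with hsd
  have hs : s < d := Nat.mod_lt _ (by omega)
  have htq : t = q * d + s := by rw [Nat.mul_comm]; omega
  by_cases hcase : s + 1 < d
  · have h2 : t + 1 = q * d + (s + 1) := by omega
    rw [h2, htq, numSel_closed d q s hd hs, numSel_closed d q (s + 1) hd hcase]
    split_ifs <;> omega
  · have hsd1 : s = d - 1 := by omega
    have hd3 : 3 ≤ d := by omega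
    have h2 : t + 1 = (q + 1) * d + 0 := by rw [Nat.succ_mul]; omega
    rw [h2, htq, numSel_closed d q s hd hs, numSel_closed d (q + 1) 0 hd (by omega)]
    split_ifs <;> omega

lemma numSel_zero (d : Nat) (hd : 2 ≤ d) : numSel d 0 = 0 := by
  unfold numSel; exact Nat.div_eq_of_lt (by omega)

lemma numSel_last (d c0 : Nat) (hd : 2 ≤ d) (hc : 1 ≤ c0) :
    numSel d (c0 * d - 1) = if d = 2 then c0 - 1 else c0 := by
  have he : (c0 - 1) * d = c0 * d - d := by rw [Nat.sub_mul, Nat.one_mul]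
  have hmul : d ≤ c0 * d := by
    have := Nat.mul_le_mul_right d hc; omega
  by_cases hd2 : d = 2
  · have h2 : c0 * d - 1 = (c0 - 1) * d + 1 := by omega
    rw [h2, numSel_closed d (c0 - 1) 1 hd (by omega), if_pos hd2]; simp
  · have h2 : c0 * d - 1 = (c0 - 1) * d + (d - 1) := by omega
    rw [h2, numSel_closed d (c0 - 1) (d - 1) hd (by omega), if_neg hd2,
      if_neg (show ¬(d - 1 ≤ 1) by omega)]
    omega

lemma tmod_last (d c0 : Nat) (hd : 2 ≤ d) (hc : 1 ≤ c0) :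
    (c0 * d - 1) % d = d - 1 := by
  have he : (c0 - 1) * d = c0 * d - d := by rw [Nat.sub_mul, Nat.one_mul]
  have hmul : d ≤ c0 * d := by
    have := Nat.mul_le_mul_right d hc; omega
  have he2 : d * (c0 - 1) = c0 * d - d := by rw [Nat.mul_comm d (c0 - 1)]; exact he
  have h2 : c0 * d - 1 = d * (c0 - 1) + (d - 1) := by omega
  rw [h2, Nat.mul_add_mod, Nat.mod_eq_of_lt (by omega)]

lemma idx_lt_mul (d c0 k' c k : Nat) (hd : 2 ≤ d) (hk' : k' < k) (hc : c < c0) :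
    k' * (c0 * d) + c * d + 1 < k * (c0 * d) := by
  have h1 : c * d + d ≤ c0 * d := by
    have h := Nat.mul_le_mul_right d hc
    rw [Nat.succ_mul] at h; omega
  have h2 : k' * (c0 * d) + (c0 * d) ≤ k * (c0 * d) := by
    have h := Nat.mul_le_mul_right (c0 * d) hk'
    rw [Nat.succ_mul] at h; omega
  omega

lemma getD_map_range_lt (f : Nat → Int) (n j : Nat) (hj : j < n) :
    ((List.range n).map f).getD j 0 = f j := by
  simp [List.getD, hj]

lemma getD_append_left (xs : List Int) (x : Int) (i : Nat) (hi : i < xs.length) :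
    (xs ++ [x]).getD i 0 = xs.getD i 0 := by
  simp [List.getD, List.getElem?_append_left hi]

lemma getD_append_length (xs : List Int) (x : Int) :
    (xs ++ [x]).getD xs.length 0 = x := by
  simp [List.getD]

-- main characterisation of A's fold, for 2 ≤ d, 1 ≤ c0
lemma foldA_char (d c0 : Nat) (hd : 2 ≤ d) (hc : 1 ≤ c0) (r : List Int) :
    (PySem.List.enumerate r 0).foldl (stepA (c0 : Int) (d : Int)) ([], []) =
    ((List.range (r.length / (c0 * d))).map (fun k =>
        (List.range c0).map (fun c => r.getD (k * (c0 * d) + c * d + 1) 0)),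
     (List.range (numSel d (r.length % (c0 * d)))).map
        (fun c => r.getD (r.length / (c0 * d) * (c0 * d) + c * d + 1) 0)) := by
  have hWpos : 0 < c0 * d := by positivity
  induction r using List.reverseRecOn with
  | nil =>
    simp [PySem.List.enumerate_nil, numSel, Nat.zero_div,
      Nat.zero_mod, Nat.div_eq_of_lt (show d - 2 < d by omega)]
  | append_singleton xs x ih =>
    rw [PySem.List.enumerate_append, List.foldl_append, ih]
    set m := xs.length with hm
    set W := c0 * d with hWdef
    set k := m / W with hk
    set t := m % W with ht
    have htW : t < W := Nat.mod_lt _ hWpos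
    clear_value m W k t
    have hmEq : W * k + t = m := by rw [hk, ht]; exact Nat.div_add_mod m W
    have hmEq2 : k * W + t = m := by rw [Nat.mul_comm]; exact hmEq
    have hdW : d ≤ c0 * d := Nat.le_mul_of_pos_left d (by omega)
    have hmd : m % d = t % d := by
      have h : m = d * (c0 * k) + t := by rw [← hmEq, hWdef]; ring
      rw [h, Nat.mul_add_mod]
    rw [PySem.List.enumerate_cons, PySem.List.enumerate_nil]
    simp only [List.foldl_cons, List.foldl_nil]
    have hlen : (xs ++ [x]).length = m + 1 := by simp [hm]
    rw [hlen]
    have hcastW : (c0 : Int) * (d : Int) = ((W : Nat) : Int) := by rw [hWdef]; push_cast; ring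
    have hcond1 : (PySem.Int.mod (0 + (m : Int)) (d : Int) = 1) ↔ (t % d = 1) := by
      rw [zero_add, PySem.Int.mod_natCast, ← hmd]
      constructor <;> intro h <;> omega
    have hcond2 : (PySem.Int.mod (0 + (m : Int)) ((c0 : Int) * (d : Int)) = (c0 : Int) * (d : Int) - 1) ↔ (t = W - 1) := by
      rw [zero_add, hcastW, PySem.Int.mod_natCast, ← ht]
      constructor <;> intro h <;> omega
    have hcomm : k * W = W * k := Nat.mul_comm k W
    have haux : ∀ i, i < m → (xs ++ [x]).getD i 0 = xs.getD i 0 := by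
      intro i hi; exact getD_append_left xs x i (hm ▸ hi)
    have hauxm : (xs ++ [x]).getD m 0 = x := by
      rw [hm]; exact getD_append_length xs x
    have he2 : (c0 - 1) * d = c0 * d - d := by rw [Nat.sub_mul, Nat.one_mul]
    have hfst : List.map (fun k' => List.map (fun c => (xs ++ [x]).getD (k' * W + c * d + 1) 0) (List.range c0)) (List.range k) = List.map (fun k' => List.map (fun c => xs.getD (k' * W + c * d + 1) 0) (List.range c0)) (List.range k) := by
      apply List.map_congr_left
      intro k' hk'
      apply List.map_congr_left
      intro c hcm
      have hk'k := List.mem_range.mp hk'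
      have hcc := List.mem_range.mp hcm
      have hlt := idx_lt_mul d c0 k' c k hd hk'k hcc
      rw [← hWdef] at hlt
      exact haux _ (by omega)
    have hsnd : ∀ n, (∀ c, c < n → c * d + 1 < t) → List.map (fun c => (xs ++ [x]).getD (k * W + c * d + 1) 0) (List.range n) = List.map (fun c => xs.getD (k * W + c * d + 1) 0) (List.range n) := by
      intro n hb
      apply List.map_congr_left
      intro c hcm
      exact haux _ (by have := hb c (List.mem_range.mp hcm); omega)
    by_cases h2 : t = W - 1
    · simp only [stepA, if_pos (hcond2.mpr h2)]
      have he : m + 1 = W * (k + 1) := by rw [Nat.mul_succ]; omega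
      have hdiv : (m + 1) / W = k + 1 := by rw [he, Nat.mul_div_cancel_left _ hWpos]
      have hmod : (m + 1) % W = 0 := by rw [he, Nat.mul_mod_right]
      rw [hdiv, hmod, numSel_zero d hd]
      simp only [List.range_zero, List.map_nil, Prod.mk.injEq]
      refine ⟨?_, trivial⟩
      rw [List.range_succ, List.map_append, List.map_cons, List.map_nil, hfst]
      have htval : t = c0 * d - 1 := by rw [h2, hWdef]
      have htmod : t % d = d - 1 := by rw [htval]; exact tmod_last d c0 hd hc
      have hnum : numSel d t = if d = 2 then c0 - 1 else c0 := by
        rw [htval]; exact numSel_last d c0 hd hc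
      have hr : List.range c0 = List.range (c0 - 1) ++ [c0 - 1] := by
        conv_lhs => rw [show c0 = (c0 - 1) + 1 by omega]
        rw [List.range_succ]
      have hrow : (if PySem.Int.mod (0 + (m : Int)) (d : Int) = 1 then List.map (fun c => xs.getD (k * W + c * d + 1) 0) (List.range (numSel d t)) ++ [x] else List.map (fun c => xs.getD (k * W + c * d + 1) 0) (List.range (numSel d t))) = List.map (fun c => (xs ++ [x]).getD (k * W + c * d + 1) 0) (List.range c0) := by
        by_cases hd2 : d = 2
        · rw [if_pos (hcond1.mpr (by omega)), hnum, if_pos hd2]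
          rw [hr, List.map_append, List.map_cons, List.map_nil]
          have hA : List.map (fun c => (xs ++ [x]).getD (k * W + c * d + 1) 0) (List.range (c0 - 1)) = List.map (fun c => xs.getD (k * W + c * d + 1) 0) (List.range (c0 - 1)) := by
            refine hsnd (c0 - 1) ?_
            intro c hcb
            have hbb := Nat.mul_le_mul_right d (show c + 1 ≤ c0 - 1 by omega)
            rw [Nat.succ_mul] at hbb
            subst hd2; omega
          have hidx : k * W + (c0 - 1) * d + 1 = m := by subst hd2; omega
          rw [hA, hidx, hauxm]
        · have hd3 : 3 ≤ d := by omega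
          rw [if_neg (fun hx => by have := hcond1.mp hx; omega), hnum, if_neg hd2]
          refine (hsnd c0 ?_).symm
          intro c hcb
          have hbb := Nat.mul_le_mul_right d (show c + 1 ≤ c0 by omega)
          rw [Nat.succ_mul] at hbb
          omega
      rw [hrow]
    · simp only [stepA, if_neg (fun hx => h2 (hcond2.mp hx))]
      have he : m + 1 = W * k + (t + 1) := by omega
      have hdiv : (m + 1) / W = k := by
        rw [he, Nat.mul_add_div hWpos, Nat.div_eq_of_lt (by omega)]
        omega
      have hmod : (m + 1) % W = t + 1 := by
        rw [he, Nat.mul_add_mod, Nat.mod_eq_of_lt (by omega)]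
      rw [hdiv, hmod]
      simp only [Prod.mk.injEq]
      refine ⟨hfst.symm, ?_⟩
      by_cases h1 : t % d = 1
      · rw [if_pos (hcond1.mpr h1)]
        obtain ⟨hn1, hn2⟩ := numSel_succ_of_one d t hd h1
        rw [hn1, List.range_succ, List.map_append, List.map_cons, List.map_nil]
        have hA := hsnd _ (fun c hcb => sel_idx_lt d t c hd hcb)
        have hidx : k * W + numSel d t * d + 1 = m := by omega
        rw [hA, hidx, hauxm]
      · rw [if_neg (fun hx => h1 (hcond1.mp hx))]
        rw [numSel_succ_of_ne_one d t hd h1]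
        exact (hsnd _ (fun c hcb => sel_idx_lt d t c hd hcb)).symm

-- degenerate: no index is ever selected → every well row is []
lemma fold_no_select (cols nd : Int) (h : ∀ i : Int, PySem.Int.mod i nd ≠ 1)
    (l : List (Int × Int)) : ∀ (w : List (List Int)),
    (l.foldl (stepA cols nd) (w, [])).2 = [] ∧
    ∀ x ∈ (l.foldl (stepA cols nd) (w, [])).1, x ∈ w ∨ x = [] := by
  induction l with
  | nil => intro w; exact ⟨rfl, fun x hx => Or.inl hx⟩
  | cons p l ih =>
    intro w
    have hstep : stepA cols nd (w, []) p = if PySem.Int.mod p.1 (cols * nd) = cols * nd - 1 then (w ++ [[]], []) else (w, []) := by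
      simp [stepA, h p.1]
    by_cases hc : PySem.Int.mod p.1 (cols * nd) = cols * nd - 1
    · simp only [List.foldl_cons, hstep, if_pos hc]
      refine ⟨(ih (w ++ [[]])).1, fun x hx => ?_⟩
      rcases (ih (w ++ [[]])).2 x hx with hw | hn
      · rcases List.mem_append.mp hw with h1 | h1
        · exact Or.inl h1
        · simp at h1; exact Or.inr h1
      · exact Or.inr hn
    · simp only [List.foldl_cons, hstep, if_neg hc]
      exact ih w

-- degenerate: the append condition never fires → no well is ever produced
lemma fold_no_append (cols nd : Int) (h : ∀ i : Int, PySem.Int.mod i (cols * nd) ≠ cols * nd - 1)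
    (l : List (Int × Int)) : ∀ (st : List (List Int) × List Int),
    (l.foldl (stepA cols nd) st).1 = st.1 := by
  induction l with
  | nil => intro st; rfl
  | cons p l ih =>
    intro st
    have hstep : stepA cols nd st p = (st.1, if PySem.Int.mod p.1 nd = 1 then st.2 ++ [p.2] else st.2) := by
      simp [stepA, h p.1]
    simp only [List.foldl_cons, hstep]
    exact ih _

lemma pyZipStarL_all_nil (rowsL : List (List Int)) (h : ∀ l ∈ rowsL, l = []) :
    pyZipStarL rowsL = [] := by
  match rowsL with
  | [] => rfl
  | r0 :: rs =>
    have h0 : r0.length = 0 := by rw [h r0 (by simp)]; rfl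
    have haux : ∀ (l : List (List Int)), l.foldl (fun acc l => min acc l.length) 0 = 0 := by
      intro l; induction l with
      | nil => rfl
      | cons a l ih => simpa using ih
    simp [pyZipStarL, h0, haux rs]

lemma pyZipStarL_const_len (c0 : Nat) (rowsL : List (List Int))
    (h : ∀ l ∈ rowsL, l.length = c0) (hne : rowsL ≠ []) :
    pyZipStarL rowsL = (List.range c0).map (fun j => rowsL.map (fun l => l.getD j 0)) := by
  match rowsL with
  | [] => exact absurd rfl hne
  | r0 :: rs =>
    have h0 : r0.length = c0 := h r0 (by simp)
    have haux : ∀ (l : List (List Int)), (∀ x ∈ l, x.length = c0) →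
        l.foldl (fun acc x => min acc x.length) c0 = c0 := by
      intro l hl; induction l with
      | nil => rfl
      | cons a l ih =>
        have := hl a (by simp)
        simp only [List.foldl_cons, this, min_self]
        exact ih (fun x hx => hl x (by simp [hx]))
    simp [pyZipStarL, h0, haux rs (fun x hx => h x (by simp [hx]))]

-- ===== VERDICT (by name: the statement is the Claim_ definition above) =====
theorem createHeatmapArray_spec : Claim_equal_createHeatmapArray := by
  intro ci rows cols nd _hdom hpre
  unfold Spec_createHeatmapArray createHeatmapArray createHeatmapArray_alt
  dsimp only
  by_cases hmain : 2 ≤ nd ∧ 1 ≤ cols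
  · obtain ⟨hnd, hcols⟩ := hmain
    have hndeq : ((nd.toNat : Nat) : Int) = nd := Int.toNat_of_nonneg (by omega)
    have hceq : ((cols.toNat : Nat) : Int) = cols := Int.toNat_of_nonneg (by omega)
    set d := nd.toNat with hdd
    set c0 := cols.toNat with hcc
    have hd : 2 ≤ d := by omega
    have hc : 1 ≤ c0 := by omega
    rw [← hceq, ← hndeq, foldA_char d c0 hd hc ci.reverse]
    rw [if_neg (show ¬(((d : Nat) : Int) < 2 ∨ ((c0 : Nat) : Int) < 1) by omega)]
    have hcastW : ((c0 : Nat) : Int) * ((d : Nat) : Int) = (((c0 * d : Nat) : Nat) : Int) := (Nat.cast_mul c0 d).symm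
    rw [hcastW, PySem.Int.floordiv_natCast]
    set n := ci.reverse.length with hn
    by_cases hnb : n / (c0 * d) = 0
    · rw [hnb, if_pos (by norm_num)]
      simp [pyZipStarL]
    · rw [if_neg (by exact_mod_cast hnb)]
      dsimp only
      rw [Int.toNat_natCast]
      have hlen : ∀ l ∈ (List.range (n / (c0 * d))).map (fun k => (List.range c0).map (fun c => ci.reverse.getD (k * (c0 * d) + c * d + 1) 0)), l.length = c0 := by
        intro l hl
        obtain ⟨k, -, rfl⟩ := List.mem_map.mp hl
        simp
      have hne : (List.range (n / (c0 * d))).map (fun k => (List.range c0).map (fun c => ci.reverse.getD (k * (c0 * d) + c * d + 1) 0)) ≠ [] := by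
        simp only [ne_eq, List.map_eq_nil_iff, List.range_eq_nil]
        omega
      rw [pyZipStarL_const_len c0 _ hlen hne]
      apply List.map_congr_left
      intro j hj
      have hjlt := List.mem_range.mp hj
      rw [List.map_map]
      apply List.map_congr_left
      intro b _hb
      simp only [Function.comp]
      rw [getD_map_range_lt _ c0 j hjlt]
      have hcast : ((b : Int) * ((c0 * d : Nat) : Int) + (j : Int) * ((d : Nat) : Int) + 1) = ((b * (c0 * d) + j * d + 1 : Nat) : Int) := by push_cast; ring
      rw [hcast, PySem.List.pyGetD_natCast]
  · rw [if_pos (by rcases Int.lt_or_le nd 2 with h | h; exact Or.inl h; exact Or.inr (by omega))]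
    rcases hpre with hciNil | ⟨hnd0, hc0⟩
    · subst hciNil
      simp [PySem.List.enumerate_nil, pyZipStarL]
    · by_cases hnd1 : nd ≤ 1
      · have hnosel : ∀ i : Int, PySem.Int.mod i nd ≠ 1 := by
          intro i hi
          by_cases h : 0 < nd
          · have h1 := PySem.Int.mod_nonneg i (b := nd) h
            have h2 := PySem.Int.mod_lt i (b := nd) h
            omega
          · have h3 := PySem.Int.mod_neg_bounds (a := i) (b := nd) (by omega)
            omega
        have hall := fold_no_select cols nd hnosel (PySem.List.enumerate ci.reverse 0) []
        refine pyZipStarL_all_nil _ ?_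
        intro l hl
        rcases hall.2 l hl with hw | hnil
        · simp at hw
        · exact hnil
      · have hndpos : 0 < nd := by omega
        have hcneg : cols < 0 := by
          rcases Int.lt_or_le cols 0 with h | h
          · exact h
          · exact absurd ⟨by omega, by omega⟩ hmain
        have hW : cols * nd < 0 := mul_neg_of_neg_of_pos hcneg hndpos
        have hnoapp : ∀ i : Int, PySem.Int.mod i (cols * nd) ≠ cols * nd - 1 := by
          intro i hi
          have h3 := PySem.Int.mod_neg_bounds (a := i) (b := cols * nd) hW
          omega
        rw [fold_no_append cols nd hnoapp (PySem.List.enumerate ci.reverse 0) ([], [])]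
        rfl
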